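-- pv_equiv track=rewrite | github.com/salsabiilashifa11/CryptoCalculator | textUtil.py | pt2IntArr
-- ===== SOURCE A (Python) =====
-- def pt2IntArr(byte_pt, block_length):
--     equalSizedStr = [byte_pt[i:i+block_length] for i in range(0,len(byte_pt), block_length)]
--     block = []
--
--     for string in equalSizedStr:
--         asciiStr = ''
--         for character in string:
--             asciiStr += str(character).rjust(3, '0')
--         block.append(int(asciiStr))
--
--     return block
-- ===== SOURCE B (Python) =====
-- def pt2IntArr(byte_pt, block_length):
--     # Horner's rule: accumulate each block's padded-decimal encoding arithmetically
--     # (shift by 10**max(3, len(str(c))), the width of the padded chunk) instead of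
--     # concatenating zero-padded strings and parsing the concatenation with int().
--     block = []
--     for start in range(0, len(byte_pt), block_length):
--         acc = 0
--         for c in byte_pt[start:start + block_length]:
--             acc = acc * 10 ** max(3, len(str(c))) + c
--         block.append(acc)
--     return block
-- ===== Notes on version B (the rewrite author's own statement) =====
-- stated objective: alternative
-- what changed: Each block's value is accumulated arithmetically with Horner's rule (acc = acc * 10**max(3, len(str(c))) + c) instead of concatenating zero-padded strings per block and parsing the concatenation with int().
-- outside the precondition, e.g. on pt2IntArr([-500, 3], 2): A returns [-500003], B returns [-499997]
import Mathlib
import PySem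

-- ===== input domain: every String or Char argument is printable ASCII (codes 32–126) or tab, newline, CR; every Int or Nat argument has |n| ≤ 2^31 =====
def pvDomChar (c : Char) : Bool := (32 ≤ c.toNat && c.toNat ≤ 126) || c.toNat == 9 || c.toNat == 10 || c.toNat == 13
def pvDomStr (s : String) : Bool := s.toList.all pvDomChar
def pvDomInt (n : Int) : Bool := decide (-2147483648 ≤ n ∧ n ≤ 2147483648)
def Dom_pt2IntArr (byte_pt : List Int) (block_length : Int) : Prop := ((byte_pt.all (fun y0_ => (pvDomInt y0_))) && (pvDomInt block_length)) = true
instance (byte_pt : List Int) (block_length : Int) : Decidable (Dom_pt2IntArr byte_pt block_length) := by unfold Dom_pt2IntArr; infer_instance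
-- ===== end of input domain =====

-- B replaces A's build-a-padded-string-then-int() per block by Horner-style integer
-- accumulation (shift by 10^max(3, len(str(c))), the padded chunk's width).

-- ===== PORT A =====
-- str(x).rjust(3, '0'): Python pads on the left up to width 3 (no-op when already ≥ 3 chars)
def pyRjust3 (cs : List Char) : List Char := List.replicate (3 - cs.length) '0' ++ cs

-- hand port of int(s) (the digit core of PySem.Int.ofChars? is a private definition we
-- cannot reason about): exact on NONEMPTY ALL-DIGIT strings — the only shape asciiStr
-- takes under Pre_; none = ValueError
def pyIntOfDigits? (cs : List Char) : Option Int :=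
  if cs ≠ [] ∧ cs.all Char.isDigit then
    some (cs.foldl (fun a c => a * 10 + ((c.toNat : Int) - 48)) 0)
  else none

def pt2IntArr (byte_pt : List Int) (block_length : Int) : List Int :=
  let equalSizedStr :=
    (PySem.List.pyRange 0 (byte_pt.length : Int) block_length).map
      (fun i => PySem.List.slice byte_pt (some i) (some (i + block_length)))
  equalSizedStr.foldl
    (fun block string =>
      block ++
        [(pyIntOfDigits?
            (string.foldl
              (fun asciiStr character => asciiStr ++ pyRjust3 (PySem.Int.toChars character))
              [])).getD 0])
    []

-- ===== PORT B =====
def pt2IntArr_alt (byte_pt : List Int) (block_length : Int) : List Int :=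
  (PySem.List.pyRange 0 (byte_pt.length : Int) block_length).foldl
    (fun block start =>
      block ++
        [(PySem.List.slice byte_pt (some start) (some (start + block_length))).foldl
            (fun acc c =>
              acc * 10 ^ (max 3 (PySem.Int.toChars c).length) + c)
            0])
    []

-- ===== PRECONDITION & SPEC =====
-- Pre_ excludes block_length = 0 (range() raises ValueError) and negative elements when
-- block_length > 0: there int() almost always raises ValueError on the mis-padded string
-- (e.g. '0-5'), and in the rare case a ≥3-digit negative leads a block A's signed string
-- concatenation yields a value no arithmetic accumulation naturally matches.
def Pre_pt2IntArr (byte_pt : List Int) (block_length : Int) : Prop :=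
  block_length ≠ 0 ∧ (0 < block_length → ∀ c ∈ byte_pt, 0 ≤ c)
instance (byte_pt : List Int) (block_length : Int) : Decidable (Pre_pt2IntArr byte_pt block_length) := by unfold Pre_pt2IntArr; infer_instance

def pvWitness_pt2IntArr : List Int × Int := ([72, 101, 108, 108, 111], 2)

def Spec_pt2IntArr (byte_pt : List Int) (block_length : Int) (out : List Int) : Prop := out = pt2IntArr_alt byte_pt block_length
instance (byte_pt : List Int) (block_length : Int) (out : List Int) : Decidable (Spec_pt2IntArr byte_pt block_length out) := by unfold Spec_pt2IntArr; infer_instance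

-- ===== CLAIM (what is proved, stated in full; the proofs are below) =====
def Claim_equal_pt2IntArr : Prop := ∀ (byte_pt : List Int) (block_length : Int), Dom_pt2IntArr byte_pt block_length → Pre_pt2IntArr byte_pt block_length → Spec_pt2IntArr byte_pt block_length (pt2IntArr byte_pt block_length)

-- ===== LEMMAS AND PROOFS =====

-- reference form of Nat.toDigits 10 (structural recursion instead of fuel)
def digitsRef (n : Nat) : List Char :=
  if _h : n < 10 then [Nat.digitChar n]
  else digitsRef (n / 10) ++ [Nat.digitChar (n % 10)]
decreasing_by exact Nat.div_lt_self (by omega) (by omega)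

theorem toDigitsCore_eq_digitsRef (fuel n : Nat) (ds : List Char) (h : n < fuel) :
    Nat.toDigitsCore 10 fuel n ds = digitsRef n ++ ds := by
  induction fuel generalizing n ds with
  | zero => omega
  | succ f ih =>
    rw [Nat.toDigitsCore]
    by_cases h10 : n / 10 = 0
    · have hn : n < 10 := by omega
      simp [h10, digitsRef, hn, Nat.mod_eq_of_lt hn]
    · have hlt : n / 10 < f := by
        have := Nat.div_lt_self (n := n) (by omega) (by omega : (1:Nat) < 10)
        omega
      simp only [h10]
      rw [ih _ _ hlt]
      have hn : ¬ n < 10 := by omega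
      conv_rhs => rw [digitsRef]
      simp [hn]

theorem toChars_eq_digitsRef (c : Int) (hc : 0 ≤ c) :
    PySem.Int.toChars c = digitsRef c.toNat := by
  rw [PySem.Int.toChars, if_neg (by omega), Nat.toDigits,
    toDigitsCore_eq_digitsRef _ _ _ (Nat.lt_succ_self _), List.append_nil]

-- value of a digit string (the accumulator of the hand-ported int())
def digitsVal (cs : List Char) : Int :=
  cs.foldl (fun a c => a * 10 + ((c.toNat : Int) - 48)) 0

theorem digitsVal_foldl (cs : List Char) (a : Int) :
    cs.foldl (fun a c => a * 10 + ((c.toNat : Int) - 48)) a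
      = a * 10 ^ cs.length + digitsVal cs := by
  induction cs generalizing a with
  | nil => simp [digitsVal]
  | cons c cs ih =>
    simp only [List.foldl_cons, List.length_cons, digitsVal] at *
    rw [ih, ih (0 * 10 + ((c.toNat : Int) - 48))]
    ring

theorem digitsVal_append (xs ys : List Char) :
    digitsVal (xs ++ ys) = digitsVal xs * 10 ^ ys.length + digitsVal ys := by
  rw [digitsVal, List.foldl_append, digitsVal_foldl]
  rfl

theorem digitChar_val (m : Nat) (h : m < 10) :
    ((Nat.digitChar m).toNat : Int) - 48 = (m : Int) := by
  interval_cases m <;> decide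

theorem digitsVal_digitsRef (n : Nat) : digitsVal (digitsRef n) = (n : Int) := by
  induction n using Nat.strong_induction_on with
  | _ n ih =>
    rw [digitsRef]
    by_cases h : n < 10
    · simp [h, digitsVal, digitChar_val n h]
    · rw [dif_neg h, digitsVal_append, ih (n / 10) (Nat.div_lt_self (by omega) (by omega))]
      simp [digitsVal, digitChar_val (n % 10) (Nat.mod_lt _ (by omega))]
      omega

theorem digitsRef_ne_nil (n : Nat) : digitsRef n ≠ [] := by
  rw [digitsRef]
  by_cases h : n < 10 <;> · simp [h]

theorem digitChar_isDigit (m : Nat) (h : m < 10) : (Nat.digitChar m).isDigit = true := by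
  interval_cases m <;> decide

theorem digitsRef_all_digit (n : Nat) : (digitsRef n).all Char.isDigit = true := by
  induction n using Nat.strong_induction_on with
  | _ n ih =>
    rw [digitsRef]
    by_cases h : n < 10
    · simp [h, digitChar_isDigit n h]
    · rw [dif_neg h]
      simp [ih (n / 10) (Nat.div_lt_self (by omega) (by omega)),
        digitChar_isDigit (n % 10) (Nat.mod_lt _ (by omega))]

theorem digitsVal_replicate_zero (k : Nat) : digitsVal (List.replicate k '0') = 0 := by
  induction k with
  | zero => rfl
  | succ k ih =>
    rw [List.replicate_succ, show ('0'::List.replicate k '0') = ['0'] ++ List.replicate k '0' from rfl,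
      digitsVal_append, ih]
    norm_num [digitsVal]
    decide

theorem digitsVal_pyRjust3 (n : Nat) : digitsVal (pyRjust3 (digitsRef n)) = (n : Int) := by
  rw [pyRjust3, digitsVal_append, digitsVal_replicate_zero, digitsVal_digitsRef]
  ring

theorem length_pyRjust3 (cs : List Char) : (pyRjust3 cs).length = max 3 cs.length := by
  simp [pyRjust3]
  omega

-- per-block value: A's parsed concatenation of padded chunks = B's Horner accumulation
theorem block_eq (L : List Int) (hL : ∀ c ∈ L, 0 ≤ c) :
    digitsVal (L.flatMap (fun c => pyRjust3 (PySem.Int.toChars c)))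
      = L.foldl
          (fun acc c => acc * 10 ^ (max 3 (PySem.Int.toChars c).length) + c)
          0 := by
  induction L using List.reverseRecOn with
  | nil => rfl
  | append_singleton L c ih =>
    have hc : 0 ≤ c := hL c (by simp)
    have hL' : ∀ x ∈ L, 0 ≤ x := fun x hx => hL x (by simp [hx])
    rw [List.flatMap_append, digitsVal_append, List.foldl_append, ih hL']
    simp only [List.flatMap_cons, List.flatMap_nil, List.append_nil, List.foldl_cons, List.foldl_nil]
    rw [toChars_eq_digitsRef c hc, digitsVal_pyRjust3, length_pyRjust3]
    congr 2
    omega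

theorem pyIntOfDigits?_block (L : List Int) (hne : L ≠ []) (hL : ∀ c ∈ L, 0 ≤ c) :
    pyIntOfDigits? (L.flatMap (fun c => pyRjust3 (PySem.Int.toChars c)))
      = some (digitsVal (L.flatMap (fun c => pyRjust3 (PySem.Int.toChars c)))) := by
  rw [pyIntOfDigits?, if_pos, digitsVal]
  constructor
  · obtain ⟨x, L', rfl⟩ := List.exists_cons_of_ne_nil hne
    have hx : 0 ≤ x := hL x (by simp)
    simp only [List.flatMap_cons, ne_eq, List.append_eq_nil_iff, not_and]
    intro h
    exfalso
    have hpad : pyRjust3 (PySem.Int.toChars x) ≠ [] := by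
      rw [toChars_eq_digitsRef x hx, pyRjust3]
      simp [digitsRef_ne_nil]
    exact hpad h
  · rw [List.all_eq_true]
    intro c hc
    rw [List.mem_flatMap] at hc
    obtain ⟨x, hxL, hcx⟩ := hc
    rw [toChars_eq_digitsRef x (hL x hxL), pyRjust3] at hcx
    rcases List.mem_append.mp hcx with h | h
    · rw [List.eq_of_mem_replicate h]; decide
    · exact (List.all_eq_true.mp (digitsRef_all_digit x.toNat)) c h

theorem pyRange_neg_nil (n s : Int) (hn : 0 ≤ n) (hs : s < 0) :
    PySem.List.pyRange 0 n s = [] := by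
  rw [PySem.List.pyRange, if_neg (by omega)]
  simp only [if_neg (by omega : ¬ (0:Int) < s), if_neg (by omega : ¬ n < 0)]
  simp

theorem pt2IntArr_eq_alt (byte_pt : List Int) (block_length : Int)
    (hpre : Pre_pt2IntArr byte_pt block_length) :
    pt2IntArr byte_pt block_length = pt2IntArr_alt byte_pt block_length := by
  obtain ⟨hbl0, hnn⟩ := hpre
  rw [pt2IntArr, pt2IntArr_alt]
  rw [PySem.List.foldl_append_singleton_eq_map
        (f := fun string => (pyIntOfDigits?
            (List.foldl (fun asciiStr character => asciiStr ++ pyRjust3 (PySem.Int.toChars character)) [] string)).getD 0),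
      PySem.List.foldl_append_singleton_eq_map
        (f := fun start => (PySem.List.slice byte_pt (some start) (some (start + block_length))).foldl
            (fun acc c => acc * 10 ^ (max 3 (PySem.Int.toChars c).length) + c) 0)]
  simp only [List.nil_append, List.map_map]
  rcases lt_or_gt_of_ne hbl0 with hneg | hpos
  · rw [pyRange_neg_nil _ _ (by positivity) hneg]
    rfl
  · apply List.map_congr_left
    intro i hi
    rw [PySem.List.mem_pyRange_iff_of_pos hpos] at hi
    obtain ⟨hi0, hilt, -⟩ := hi
    simp only [Function.comp_apply]
    set L := PySem.List.slice byte_pt (some i) (some (i + block_length)) with hLdef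
    have hLsub : ∀ c ∈ L, 0 ≤ c := fun c hc =>
      hnn hpos c (PySem.List.mem_of_mem_slice _ _ _ hc)
    have hLne : L ≠ [] := by
      rw [hLdef, PySem.List.slice_toNat byte_pt hi0 (by omega)]
      intro h
      rw [List.take_eq_nil_iff] at h
      rcases h with h | h
      · omega
      · rw [List.drop_eq_nil_iff] at h
        omega
    rw [PySem.List.foldl_append_eq_flatMap
          (g := fun character => pyRjust3 (PySem.Int.toChars character)),
        List.nil_append,
        pyIntOfDigits?_block L hLne hLsub, Option.getD_some, block_eq L hLsub]

-- ===== VERDICT (by name: the statement is the Claim_ definition above) =====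
theorem pt2IntArr_spec : Claim_equal_pt2IntArr := by
  intro byte_pt block_length _hdom hpre
  unfold Spec_pt2IntArr
  exact pt2IntArr_eq_alt byte_pt block_length hpre
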